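-- pv_equiv track=rewrite | github.com/xupeng211/FootballPrediction | comprehensive_syntax_fix.py | fix_docstring_errors
-- ===== SOURCE A (Python) =====
-- def fix_docstring_errors(content: str) -> str:
--     """修复文档字符串错误"""
--     # 找到所有未闭合的文档字符串
--     lines = content.split('\n')
--     in_docstring = False
--     docstring_start = 0
--
--     for i, line in enumerate(lines):
--         stripped = line.strip()
--
--         # 检查三引号
--         if '"""' in line:
--             if not in_docstring:
--                 # 开始文档字符串
--                 in_docstring = True
--                 docstring_start = i
--             else:
--                 # 结束文档字符串
--                 in_docstring = False
--
--     # 如果有未闭合的文档字符串，添加闭合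
--     if in_docstring:
--         lines.append('"""')
--
--     return '\n'.join(lines)
-- ===== SOURCE B (Python) =====
-- def fix_docstring_errors(content: str) -> str:
--     # Single character-level pass: no splitting into lines at all.
--     # open_ toggles at each newline whose line contained a run of 3 quotes;
--     # q counts the current run of consecutive '"' characters.
--     open_ = False
--     q = 0
--     hit = False
--     for ch in content:
--         if ch == '\n':
--             if hit:
--                 open_ = not open_
--             q = 0
--             hit = False
--         elif ch == '"':
--             q += 1
--             if q >= 3:
--                 hit = True
--         else:
--             q = 0
--     if hit:
--         open_ = not open_
--     return content + '\n"""' if open_ else content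
-- ===== Notes on version B (the rewrite author's own statement) =====
-- stated objective: alternative
-- what changed: Replaces split-into-lines + per-line substring search + list append + rejoin with a single character-level finite-state scan (run-length counter for consecutive quotes, per-line hit flag, open/closed toggle) that never builds a line list and appends directly to the original string.
import Mathlib
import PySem

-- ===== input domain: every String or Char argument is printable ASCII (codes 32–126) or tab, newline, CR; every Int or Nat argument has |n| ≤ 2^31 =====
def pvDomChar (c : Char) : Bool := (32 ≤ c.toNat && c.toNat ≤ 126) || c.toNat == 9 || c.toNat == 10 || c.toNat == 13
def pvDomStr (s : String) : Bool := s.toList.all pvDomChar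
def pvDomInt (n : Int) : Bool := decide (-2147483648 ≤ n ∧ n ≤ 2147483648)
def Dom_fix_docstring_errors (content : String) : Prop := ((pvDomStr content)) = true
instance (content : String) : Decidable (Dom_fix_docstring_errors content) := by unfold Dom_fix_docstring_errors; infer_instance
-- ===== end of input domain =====

-- B replaces A's split-into-lines / per-line substring test / list rebuild / rejoin
-- with a single character-level finite-state scan (alternative decomposition).


-- ===== PORT A =====
def fix_docstring_errors (content : String) : String :=
  let lines := PySem.Chars.splitOn content.toList ['\n']
  let st := (PySem.List.enumerate lines).foldl
    (fun (st : Bool × Int) (p : Int × List Char) =>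
      let _stripped := PySem.Chars.strip p.2
      if PySem.Chars.isIn ['"', '"', '"'] p.2 then
        if !st.1 then (true, p.1) else (false, st.2)
      else st)
    (false, 0)
  let lines := if st.1 then lines ++ [['"', '"', '"']] else lines
  String.ofList (PySem.Chars.join ['\n'] lines)

-- ===== PORT B =====
-- one transition of Source B's character-level state machine: (open_, q, hit)
def fdeStep (st : Bool × Nat × Bool) (ch : Char) : Bool × Nat × Bool :=
  if ch = '\n' then ((if st.2.2 then !st.1 else st.1), 0, false)
  else if ch = '"' then (st.1, st.2.1 + 1, st.2.2 || decide (3 ≤ st.2.1 + 1))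
  else (st.1, 0, st.2.2)

def fix_docstring_errors_alt (content : String) : String :=
  let st := content.toList.foldl fdeStep (false, 0, false)
  let opn := if st.2.2 then !st.1 else st.1
  if opn then String.ofList (content.toList ++ ['\n', '"', '"', '"']) else content

-- ===== PRECONDITION & SPEC =====
def Spec_fix_docstring_errors (content : String) (out : String) : Prop := out = fix_docstring_errors_alt content
instance (content : String) (out : String) : Decidable (Spec_fix_docstring_errors content out) := by unfold Spec_fix_docstring_errors; infer_instance

-- ===== CLAIM (what is proved, stated in full; the proofs are below) =====
def Claim_equal_fix_docstring_errors : Prop := ∀ (content : String), Dom_fix_docstring_errors content → Spec_fix_docstring_errors content (fix_docstring_errors content)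

-- ===== LEMMAS AND PROOFS =====

-- join over a snoc: the separator appears iff the front is nonempty
theorem pv_join_snoc (sep y : List Char) (xs : List (List Char)) :
    PySem.Chars.join sep (xs ++ [y]) =
      PySem.Chars.join sep xs ++ (if xs = [] then [] else sep) ++ y := by
  induction xs with
  | nil => simp [PySem.Chars.join, List.intercalate]
  | cons a t ih =>
    cases t with
    | nil => simp [PySem.Chars.join, List.intercalate, List.intersperse]
    | cons b u =>
      have h1 : PySem.Chars.join sep (a :: (b :: u) ++ [y]) =
          a ++ sep ++ PySem.Chars.join sep ((b :: u) ++ [y]) := by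
        simp [PySem.Chars.join, List.intercalate]
      have h2 : PySem.Chars.join sep (a :: b :: u) =
          a ++ sep ++ PySem.Chars.join sep (b :: u) := by
        simp [PySem.Chars.join, List.intercalate]
      rw [h1, ih, h2]
      simp

-- invariant of splitOn.go: joining the produced pieces reconstructs the state
theorem pv_join_go (sep : List Char) (fuel : Nat) (l cur : List Char)
    (acc : List (List Char)) :
    PySem.Chars.join sep (PySem.Chars.splitOn.go sep fuel l cur acc) =
      PySem.Chars.join sep acc.reverse ++ (if acc = [] then [] else sep) ++ cur.reverse ++ l := by
  induction fuel generalizing l cur acc with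
  | zero =>
    rw [PySem.Chars.splitOn.go.eq_1]
    rw [show ((cur.reverse ++ l) :: acc).reverse = acc.reverse ++ [cur.reverse ++ l] by simp]
    rw [pv_join_snoc]
    cases acc <;> simp
  | succ fuel ih =>
    cases l with
    | nil =>
      rw [PySem.Chars.splitOn.go.eq_2 _ _ _ _ (by omega)]
      rw [show (cur.reverse :: acc).reverse = acc.reverse ++ [cur.reverse] by simp]
      rw [pv_join_snoc]
      cases acc <;> simp
    | cons c rest =>
      rw [PySem.Chars.splitOn.go.eq_3]
      by_cases hpre : sep.isPrefixOf (c :: rest) = true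
      · rw [if_pos hpre]
        rw [ih]
        rw [show ((cur.reverse :: acc) : List (List Char)).reverse = acc.reverse ++ [cur.reverse] by simp]
        rw [pv_join_snoc]
        have hp : sep <+: (c :: rest) := List.isPrefixOf_iff_prefix.mp hpre
        obtain ⟨t, ht⟩ := hp
        have hdrop : (c :: rest).drop sep.length = t := by
          rw [← ht, List.drop_left]
        rw [hdrop]
        cases acc <;> simp [← ht]
      · rw [if_neg hpre]
        rw [ih]
        simp

-- splitOn.go never returns the empty list
theorem pv_go_ne_nil (sep : List Char) (fuel : Nat) (l cur : List Char)
    (acc : List (List Char)) : PySem.Chars.splitOn.go sep fuel l cur acc ≠ [] := by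
  induction fuel generalizing l cur acc with
  | zero => rw [PySem.Chars.splitOn.go.eq_1]; simp
  | succ fuel ih =>
    cases l with
    | nil => rw [PySem.Chars.splitOn.go.eq_2 _ _ _ _ (by omega)]; simp
    | cons c rest =>
      rw [PySem.Chars.splitOn.go.eq_3]
      by_cases hpre : sep.isPrefixOf (c :: rest) = true
      · rw [if_pos hpre]; exact ih _ _ _
      · rw [if_neg hpre]; exact ih _ _ _

theorem pv_join_splitOn (s sep : List Char) :
    PySem.Chars.join sep (PySem.Chars.splitOn s sep) = s := by
  rw [PySem.Chars.splitOn, pv_join_go sep]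
  simp [PySem.Chars.join, List.intercalate]

theorem pv_splitOn_ne_nil (s sep : List Char) : PySem.Chars.splitOn s sep ≠ [] := by
  rw [PySem.Chars.splitOn]; exact pv_go_ne_nil _ _ _ _ _

-- the toggle fold's flag is the parity of the matching lines
theorem pv_fold_parity (lines : List (Int × List Char)) (b : Bool) (d : Int) :
    (lines.foldl
      (fun (st : Bool × Int) (p : Int × List Char) =>
        let _stripped := PySem.Chars.strip p.2
        if PySem.Chars.isIn ['"', '"', '"'] p.2 then
          if !st.1 then (true, p.1) else (false, st.2)
        else st)
      (b, d)).1 =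
      xor b ((lines.filter (fun p => PySem.Chars.isIn ['"', '"', '"'] p.2)).length % 2 == 1) := by
  induction lines generalizing b d with
  | nil => simp
  | cons p t ih =>
    simp only [List.foldl_cons, List.filter_cons]
    by_cases h : PySem.Chars.isIn ['"', '"', '"'] p.2 = true
    · simp only [h, if_true]
      cases b <;> simp only [Bool.not_true, Bool.not_false, if_true] <;> rw [ih] <;>
        rcases Nat.mod_two_eq_zero_or_one
          ((t.filter (fun p => PySem.Chars.isIn ['"', '"', '"'] p.2)).length) with hh | hh <;>
        simp [List.length_cons, Nat.add_mod, hh]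
    · simp only [h]
      rw [ih]
      simp

-- filtering the enumeration by a predicate on the element matches filtering the list
theorem pv_filter_enumerate {α : Type} (xs : List α) (start : Int) (p : α → Bool) :
    ((PySem.List.enumerate xs start).filter (fun q => p q.2)).length =
      (xs.filter p).length := by
  induction xs generalizing start with
  | nil => simp [PySem.List.enumerate]
  | cons a t ih =>
    rw [PySem.List.enumerate]
    simp only [List.filter_cons]
    by_cases h : p a = true
    · simp [h, ih]
    · simp [h, ih]

def pvHasTrip : List Char → Bool
  | a :: b :: c :: t => (a = '"' && b = '"' && c = '"') || pvHasTrip (b :: c :: t)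
  | _ => false

theorem pv_hasTrip_iff_infix (l : List Char) :
    pvHasTrip l = true ↔ ['"', '"', '"'] <:+: l := by
  induction l with
  | nil => simp [pvHasTrip]
  | cons a t ih =>
    cases t with
    | nil =>
      simp only [pvHasTrip, Bool.false_eq_true, false_iff]
      intro h; have := h.length_le; simp at this
    | cons b u =>
      cases u with
      | nil =>
        simp only [pvHasTrip, Bool.false_eq_true, false_iff]
        intro h; have := h.length_le; simp at this
      | cons c v =>
        rw [pvHasTrip, List.infix_cons_iff, ← ih]
        have hpre : (['"', '"', '"'] <+: a :: b :: c :: v) ↔ (a = '"' ∧ b = '"' ∧ c = '"') := by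
          simp [List.cons_prefix_cons, eq_comm]
        rw [hpre]
        simp [and_assoc]

theorem pv_skip0 (c : Char) (t : List Char) (hc : ¬ c = '"') :
    pvHasTrip (c :: t) = pvHasTrip t := by
  match t with
  | [] => simp [pvHasTrip]
  | [b] => simp [pvHasTrip]
  | b :: d :: u =>
    rw [pvHasTrip]
    simp only [show decide (c = '"') = false from by simp [hc], Bool.false_and, Bool.false_or]

theorem pv_skip1 (c : Char) (t : List Char) (hc : ¬ c = '"') :
    pvHasTrip ('"' :: c :: t) = pvHasTrip t := by
  match t with
  | [] => simp [pvHasTrip]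
  | b :: u =>
    rw [pvHasTrip]
    simp only [show decide (c = '"') = false from by simp [hc], Bool.and_false, Bool.false_and,
      Bool.false_or]
    exact pv_skip0 c _ hc

theorem pv_skip2 (c : Char) (t : List Char) (hc : ¬ c = '"') :
    pvHasTrip ('"' :: '"' :: c :: t) = pvHasTrip t := by
  rw [pvHasTrip]
  simp only [show decide (c = '"') = false from by simp [hc], Bool.and_false, Bool.false_or]
  exact pv_skip1 c _ hc

theorem pv_line_open (l : List Char) (hnl : '\n' ∉ l) (o : Bool) (q : Nat) (h : Bool) :
    (l.foldl fdeStep (o, q, h)).1 = o := by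
  induction l generalizing q h with
  | nil => rfl
  | cons c t ih =>
    have hcn : ¬ c = '\n' := fun hh => hnl (hh ▸ List.mem_cons_self)
    have hnt : '\n' ∉ t := fun hh => hnl (List.mem_cons_of_mem _ hh)
    by_cases hq : c = '"'
    · subst hq
      rw [List.foldl_cons, show fdeStep (o, q, h) '"' = (o, q + 1, h || decide (3 ≤ q + 1)) from by
        simp [fdeStep]]
      exact ih hnt _ _
    · rw [List.foldl_cons, show fdeStep (o, q, h) c = (o, 0, h) from by
        simp [fdeStep, hcn, hq]]
      exact ih hnt _ _

theorem pv_line_hit (l : List Char) (hnl : '\n' ∉ l) (o : Bool) (q : Nat) (h : Bool) :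
    (l.foldl fdeStep (o, q, h)).2.2 =
      (h || pvHasTrip (List.replicate (min q 2) '"' ++ l)) := by
  induction l generalizing q h with
  | nil =>
    match q with
    | 0 => simp [pvHasTrip]
    | 1 => simp [pvHasTrip]
    | (n+2) => simp [pvHasTrip, List.replicate]
  | cons c t ih =>
    have hcn : ¬ c = '\n' := fun hh => hnl (hh ▸ List.mem_cons_self)
    have hnt : '\n' ∉ t := fun hh => hnl (List.mem_cons_of_mem _ hh)
    by_cases hcq : c = '"'
    · subst hcq
      rw [List.foldl_cons, show fdeStep (o, q, h) '"' = (o, q + 1, h || decide (3 ≤ q + 1)) from by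
        simp [fdeStep]]
      rw [ih hnt _ _]
      match q with
      | 0 => simp [List.replicate]
      | 1 => simp [List.replicate]
      | (n+2) => simp [pvHasTrip, List.replicate]
    · rw [List.foldl_cons, show fdeStep (o, q, h) c = (o, 0, h) from by
        simp [fdeStep, hcn, hcq]]
      rw [ih hnt _ _]
      match q with
      | 0 => simp [pv_skip0 c t hcq]
      | 1 => simp [List.replicate, pv_skip1 c t hcq]
      | (n+2) => simp [List.replicate, pv_skip2 c t hcq]

def pvLines : List Char → List (List Char)
  | [] => [[]]
  | c :: t =>
    if c = '\n' then [] :: pvLines t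
    else
      match pvLines t with
      | h :: r => (c :: h) :: r
      | [] => [[c]]

theorem pv_lines_ne_nil (l : List Char) : pvLines l ≠ [] := by
  cases l with
  | nil => simp [pvLines]
  | cons c t =>
    rw [pvLines]
    split
    · simp
    · split <;> simp

theorem pv_lines_no_nl (l : List Char) (hnl : '\n' ∉ l) : pvLines l = [l] := by
  induction l with
  | nil => rfl
  | cons c t ih =>
    have hcn : ¬ c = '\n' := fun hh => hnl (hh ▸ List.mem_cons_self)
    have hnt : '\n' ∉ t := fun hh => hnl (List.mem_cons_of_mem _ hh)
    rw [pvLines, if_neg hcn, ih hnt]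

theorem pv_lines_append (line rest : List Char) (hnl : '\n' ∉ line) :
    pvLines (line ++ '\n' :: rest) = line :: pvLines rest := by
  induction line with
  | nil => simp [pvLines]
  | cons c t ih =>
    have hcn : ¬ c = '\n' := fun hh => hnl (hh ▸ List.mem_cons_self)
    have hnt : '\n' ∉ t := fun hh => hnl (List.mem_cons_of_mem _ hh)
    rw [List.cons_append, pvLines, if_neg hcn, ih hnt]

theorem pv_split_first_nl (l : List Char) (hin : '\n' ∈ l) :
    ∃ line rest, l = line ++ '\n' :: rest ∧ '\n' ∉ line := by
  induction l with
  | nil => cases hin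
  | cons c t ih =>
    by_cases hc : c = '\n'
    · exact ⟨[], t, by rw [hc]; rfl, by simp⟩
    · have hin' : '\n' ∈ t := by
        rcases List.mem_cons.mp hin with h | h
        · exact absurd h.symm hc
        · exact h
      obtain ⟨line, rest, heq, hno⟩ := ih hin'
      exact ⟨c :: line, rest, by rw [heq]; rfl, by
        intro hm
        rcases List.mem_cons.mp hm with h | h
        · exact hc h.symm
        · exact hno h⟩

theorem pv_go_eq_lines (fuel : Nat) (l cur : List Char) (acc : List (List Char))
    (hf : l.length ≤ fuel) :
    PySem.Chars.splitOn.go ['\n'] fuel l cur acc =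
      acc.reverse ++ (pvLines l).modifyHead (cur.reverse ++ ·) := by
  induction fuel generalizing l cur acc with
  | zero =>
    have : l = [] := List.length_eq_zero_iff.mp (by omega)
    subst this
    rw [PySem.Chars.splitOn.go.eq_1]
    simp [pvLines]
  | succ fuel ih =>
    cases l with
    | nil =>
      rw [PySem.Chars.splitOn.go.eq_2 _ _ _ _ (by omega)]
      simp [pvLines]
    | cons c rest =>
      rw [PySem.Chars.splitOn.go.eq_3]
      by_cases hc : c = '\n'
      · subst hc
        rw [if_pos (by simp [List.isPrefixOf])]
        rw [ih _ _ _ (by simp at hf ⊢; omega)]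
        rw [pvLines, if_pos rfl]
        have hid : ∀ (xs : List (List Char)), List.modifyHead (fun x => x) xs = xs := by
          intro xs; cases xs <;> rfl
        simp [hid]
      · rw [if_neg (by simp [List.isPrefixOf, Ne.symm hc])]
        rw [ih _ _ _ (by simp at hf ⊢; omega)]
        rw [pvLines, if_neg hc]
        rcases hl : pvLines rest with _ | ⟨h, r⟩
        · exact absurd hl (pv_lines_ne_nil rest)
        · simp

theorem pv_splitOn_eq_lines (s : List Char) :
    PySem.Chars.splitOn s ['\n'] = pvLines s := by
  rw [PySem.Chars.splitOn, pv_go_eq_lines _ _ _ _ (by simp)]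
  rcases hl : pvLines s with _ | ⟨h, r⟩
  · exact absurd hl (pv_lines_ne_nil s)
  · simp

theorem pv_hasTrip_eq_isIn (l : List Char) :
    pvHasTrip l = PySem.Chars.isIn ['"', '"', '"'] l := by
  by_cases h : pvHasTrip l = true
  · rw [h]
    exact ((PySem.Chars.isIn_iff_infix _ _).mpr ((pv_hasTrip_iff_infix l).mp h)).symm
  · rw [Bool.eq_false_iff.mpr h]
    symm
    rw [PySem.Chars.isIn_eq_false_iff]
    intro hinf
    exact h ((pv_hasTrip_iff_infix l).mpr hinf)

theorem pv_machine_parity (n : Nat) : ∀ (l : List Char), l.length ≤ n → ∀ (o : Bool),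
    (if (l.foldl fdeStep (o, 0, false)).2.2 then !(l.foldl fdeStep (o, 0, false)).1
     else (l.foldl fdeStep (o, 0, false)).1) =
      xor o (((pvLines l).filter
        (fun line => PySem.Chars.isIn ['"', '"', '"'] line)).length % 2 == 1) := by
  induction n with
  | zero =>
    intro l hl o
    have : l = [] := List.length_eq_zero_iff.mp (by omega)
    subst this
    simp [pvLines, show PySem.Chars.isIn ['"', '"', '"'] ([] : List Char) = false from by decide]
  | succ n ih =>
    intro l hl o
    by_cases hin : '\n' ∈ l
    · obtain ⟨line, rest, heq, hno⟩ := pv_split_first_nl l hin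
      subst heq
      have hlen : rest.length ≤ n := by
        rw [List.length_append, List.length_cons] at hl; omega
      rw [List.foldl_append, List.foldl_cons]
      have hs1 := pv_line_open line hno o 0 false
      have hs2 : (line.foldl fdeStep (o, 0, false)).2.2 = pvHasTrip line := by
        rw [pv_line_hit line hno]; simp
      have hstep : fdeStep (line.foldl fdeStep (o, 0, false)) '\n' =
          (xor o (pvHasTrip line), 0, false) := by
        rw [show ∀ st : Bool × Nat × Bool, fdeStep st '\n' =
            ((if st.2.2 then !st.1 else st.1), 0, false) from fun st => by simp [fdeStep]]
        rw [hs1, hs2]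
        cases pvHasTrip line <;> simp
      rw [hstep, ih rest hlen]
      rw [pv_lines_append line rest hno, List.filter_cons]
      rw [← pv_hasTrip_eq_isIn]
      rcases Nat.mod_two_eq_zero_or_one ((pvLines rest).filter
        (fun line => PySem.Chars.isIn ['"', '"', '"'] line)).length with hk | hk <;>
        cases hpt : pvHasTrip line <;>
        cases o <;>
        simp [List.length_cons, Nat.add_mod, hk]
    · rw [pv_lines_no_nl l hin]
      have hs1 := pv_line_open l hin o 0 false
      have hs2 : (l.foldl fdeStep (o, 0, false)).2.2 = pvHasTrip l := by
        rw [pv_line_hit l hin]; simp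
      rw [hs1, hs2, List.filter_cons, ← pv_hasTrip_eq_isIn]
      cases hpt : pvHasTrip l <;> cases o <;> simp

-- ===== VERDICT (by name: the statement is the Claim_ definition above) =====
theorem fix_docstring_errors_spec : Claim_equal_fix_docstring_errors := by
  intro content _
  unfold Spec_fix_docstring_errors fix_docstring_errors fix_docstring_errors_alt
  simp only []
  rw [pv_fold_parity, pv_filter_enumerate]
  rw [pv_machine_parity content.toList.length content.toList le_rfl false]
  rw [← pv_splitOn_eq_lines]
  have hne := pv_splitOn_ne_nil content.toList ['\n']
  by_cases hpar :
      (((PySem.Chars.splitOn content.toList ['\n']).filter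
        (fun line => PySem.Chars.isIn ['"', '"', '"'] line)).length % 2 == 1) = true
  · rw [hpar]
    simp only [Bool.false_xor, if_true]
    rw [pv_join_snoc, if_neg hne, pv_join_splitOn _ _]
    simp
  · rw [Bool.eq_false_iff.mpr hpar]
    simp only [Bool.false_xor, Bool.false_eq_true, if_false]
    rw [pv_join_splitOn _ _]
    simp
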